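-- pv_equiv track=rewrite | github.com/Daria976/-2-1-5- | depvis_stage1.py | build_ascii_tree
-- ===== SOURCE A (Python) =====
-- from typing import Dict, List, Set
--
-- def build_ascii_tree(root_pkg: str, deps_map: Dict[str, List[str]]) -> str:
--     visited: Set[str] = set()
--     lines: List[str] = []
--
--     def dfs(pkg: str, prefix: str, is_last: bool):
--         marker = "└─ " if is_last else "├─ "
--         if prefix == "":
--             lines.append(pkg)
--         else:
--             lines.append(prefix + marker + pkg)
--         if pkg in visited:
--             lines.append(prefix + ("   " if is_last else "│  ") + "(cycle detected)")
--             return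
--         visited.add(pkg)
--         children = deps_map.get(pkg, [])
--         for i, child in enumerate(children):
--             last = (i == len(children) - 1)
--             new_prefix = prefix + ("   " if is_last else "│  ")
--             dfs(child, new_prefix, last)
--
--     dfs(root_pkg, "", True)
--     return "\n".join(lines)
-- ===== SOURCE B (Python) =====
-- def build_ascii_tree(root_pkg: str, deps_map) -> str:
--     visited = set()
--     lines = []
--     stack = [(root_pkg, "", True)]
--     while stack:
--         pkg, prefix, is_last = stack.pop()
--         marker = "└─ " if is_last else "├─ "
--         if prefix == "":
--             lines.append(pkg)
--         else:
--             lines.append(prefix + marker + pkg)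
--         if pkg in visited:
--             lines.append(prefix + ("   " if is_last else "│  ") + "(cycle detected)")
--             continue
--         visited.add(pkg)
--         children = deps_map.get(pkg, [])
--         new_prefix = prefix + ("   " if is_last else "│  ")
--         n = len(children)
--         for i in range(n - 1, -1, -1):
--             stack.append((children[i], new_prefix, i == n - 1))
--     return "\n".join(lines)
-- ===== Notes on version B (the rewrite author's own statement) =====
-- stated objective: alternative
-- what changed: The inner recursive dfs closure is replaced by an iterative loop over an explicit LIFO stack of (pkg, prefix, is_last) frames, pushing children in reverse so pop order reproduces A's pre-order traversal.
import Mathlib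
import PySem

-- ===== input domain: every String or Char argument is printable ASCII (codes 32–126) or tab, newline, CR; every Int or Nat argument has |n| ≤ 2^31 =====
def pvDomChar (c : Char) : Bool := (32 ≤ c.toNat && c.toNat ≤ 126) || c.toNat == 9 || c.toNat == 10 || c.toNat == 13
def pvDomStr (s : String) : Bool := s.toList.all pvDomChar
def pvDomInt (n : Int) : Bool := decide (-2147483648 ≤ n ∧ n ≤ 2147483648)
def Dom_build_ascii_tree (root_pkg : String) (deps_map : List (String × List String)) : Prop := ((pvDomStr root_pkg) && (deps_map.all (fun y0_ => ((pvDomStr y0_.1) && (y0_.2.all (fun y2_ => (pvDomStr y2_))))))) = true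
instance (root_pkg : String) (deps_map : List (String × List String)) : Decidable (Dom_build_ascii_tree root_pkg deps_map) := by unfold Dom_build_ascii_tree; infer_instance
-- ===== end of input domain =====

-- B replaces A's inner recursive dfs closure by an iterative loop over an explicit LIFO
-- stack of (pkg, prefix, is_last) frames (objective: alternative decomposition, same cost).

-- ===== PORT A =====
-- Shared with both ports: deps_map.get(pkg, []) — first-match association-list lookup.
def pvKids (dm : List (String × List String)) (pkg : String) : List String :=
  PySem.Dict.getD ⟨dm⟩ pkg []

-- A's recursion terminates because every fresh node is added to `visited` before its
-- children are visited; the Nat argument is a totality guard only, consumed once per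
-- FRESH node on the current chain, and `(dm.flatMap Prod.snd).length + 2` (chosen in
-- build_ascii_tree) is proved sufficient, so the `| 0 =>` branch is never reached there.
mutual
-- dfs(pkg, prefix, is_last) acting on the closure state (visited, lines)
def pvDfsA (dm : List (String × List String)) : Nat → String → String → Bool →
    (PySem.Set String × List String) → (PySem.Set String × List String)
  | n, pkg, pre, is_last, (v, ls) =>
    let marker := if is_last then "└─ " else "├─ "
    let ls := if pre = "" then ls ++ [pkg] else ls ++ [pre ++ marker ++ pkg]
    if PySem.Set.contains v pkg then
      (v, ls ++ [pre ++ (if is_last then "   " else "│  ") ++ "(cycle detected)"])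
    else
      match n with
      | 0 => (v, ls)  -- fuel guard, unreachable with the fuel used below
      | n + 1 =>
        let v := PySem.Set.add v pkg
        let children := pvKids dm pkg
        pvKidsA dm n (PySem.List.enumerate children 0) (PySem.List.len children)
          (pre ++ (if is_last then "   " else "│  ")) (v, ls)
termination_by n _ _ _ _ => (n, 0)

-- the `for i, child in enumerate(children)` loop of dfs
def pvKidsA (dm : List (String × List String)) : Nat → List (Int × String) → Int → String →
    (PySem.Set String × List String) → (PySem.Set String × List String)
  | _, [], _, _, st => st
  | n, (i, c) :: rest, total, np, st =>
      pvKidsA dm n rest total np (pvDfsA dm n c np (i == total - 1) st)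
termination_by n kids _ _ _ => (n, kids.length + 1)
end

def build_ascii_tree (root_pkg : String) (deps_map : List (String × List String)) : String :=
  PySem.Str.join "\n"
    (pvDfsA deps_map ((deps_map.flatMap Prod.snd).length + 2) root_pkg "" true
      (PySem.Set.empty, [])).2

-- ===== PORT B =====
-- The Python list used as a stack (top = end) is represented head-as-top, so the
-- reversed-order push loop `for i in range(n-1, -1, -1): stack.append(...)` becomes
-- prepending the in-order frame list. Fuel is consumed once per fresh pop (a totality
-- guard only; the fuel used below is proved sufficient).
def pvRunB (dm : List (String × List String)) : Nat → List (String × String × Bool) →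
    (PySem.Set String × List String) → (PySem.Set String × List String)
  | _, [], st => st
  | n, (pkg, pre, is_last) :: fs, (v, ls) =>
    let marker := if is_last then "└─ " else "├─ "
    let ls := if pre = "" then ls ++ [pkg] else ls ++ [pre ++ marker ++ pkg]
    if PySem.Set.contains v pkg then
      pvRunB dm n fs
        (v, ls ++ [pre ++ (if is_last then "   " else "│  ") ++ "(cycle detected)"])
    else
      match n with
      | 0 => (v, ls)  -- fuel guard, unreachable with the fuel used below
      | m + 1 =>
        let v := PySem.Set.add v pkg
        let children := pvKids dm pkg
        let np := pre ++ (if is_last then "   " else "│  ")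
        pvRunB dm m
          ((PySem.List.enumerate children 0).map
              (fun ic => (ic.2, np, ic.1 == PySem.List.len children - 1)) ++ fs)
          (v, ls)
termination_by n fs _ => (n, fs.length)

def build_ascii_tree_alt (root_pkg : String) (deps_map : List (String × List String)) : String :=
  PySem.Str.join "\n"
    (pvRunB deps_map ((deps_map.flatMap Prod.snd).length + 2) [(root_pkg, "", true)]
      (PySem.Set.empty, [])).2

-- ===== PRECONDITION & SPEC =====
def Spec_build_ascii_tree (root_pkg : String) (deps_map : List (String × List String)) (out : String) : Prop := out = build_ascii_tree_alt root_pkg deps_map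
instance (root_pkg : String) (deps_map : List (String × List String)) (out : String) : Decidable (Spec_build_ascii_tree root_pkg deps_map out) := by unfold Spec_build_ascii_tree; infer_instance

-- ===== CLAIM (what is proved, stated in full; the proofs are below) =====
def Claim_equal_build_ascii_tree : Prop := ∀ (root_pkg : String) (deps_map : List (String × List String)), Dom_build_ascii_tree root_pkg deps_map → Spec_build_ascii_tree root_pkg deps_map (build_ascii_tree root_pkg deps_map)

-- ===== LEMMAS AND PROOFS =====

-- the potential: number of elements of U not yet visited
def pvMu (U : List String) (v : PySem.Set String) : Nat :=
  (U.filter (fun x => !(PySem.Set.contains v x))).length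

lemma pvMu_le (U : List String) (v : PySem.Set String) : pvMu U v ≤ U.length :=
  List.length_filter_le _ _

lemma pvMu_mono (U : List String) {v w : PySem.Set String}
    (h : ∀ x, x ∈ v → x ∈ w) : pvMu U w ≤ pvMu U v := by
  unfold pvMu
  apply List.Sublist.length_le
  apply List.monotone_filter_right
  intro a ha
  simp only [Bool.not_eq_true', ← Bool.not_eq_true] at ha ⊢
  intro hc
  exact ha (by rw [PySem.Set.contains_iff] at hc ⊢; exact h _ hc)

lemma pvMu_add_lt (U : List String) (v : PySem.Set String) {pkg : String}
    (hU : pkg ∈ U) (hv : pkg ∉ v) : pvMu U (PySem.Set.add v pkg) < pvMu U v := by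
  unfold pvMu
  have e1 : (fun x => !(PySem.Set.contains v x)) = (fun x : String => !decide (x ∈ v)) := by
    funext x; simp
  have e2 : (fun x => !(PySem.Set.contains (PySem.Set.add v pkg) x))
      = (fun x : String => !decide (x ∈ v) && !decide (x = pkg)) := by
    funext x; simp [PySem.Set.add_of_not_mem hv]
  rw [e1, e2]
  have mono : ∀ (U : List String),
      (U.filter (fun x => !decide (x ∈ v) && !decide (x = pkg))).length
        ≤ (U.filter (fun x : String => !decide (x ∈ v))).length := by
    intro U
    apply List.Sublist.length_le
    apply List.monotone_filter_right
    intro a ha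
    exact (Bool.and_eq_true .. ▸ ha).1
  induction U with
  | nil => simp at hU
  | cons u U ih =>
    rcases List.mem_cons.1 hU with rfl | hU'
    · simp only [List.filter_cons]
      simp [hv]
      have := mono U; omega
    · by_cases huv : u ∈ v
      · simp only [List.filter_cons]
        simp [huv]
        exact ih hU'
      · by_cases hup : u = pkg
        · subst hup
          simp only [List.filter_cons]
          simp [huv]
          have := mono U; omega
        · simp only [List.filter_cons]
          simp [huv, hup]
          have := ih hU'; omega

lemma pvChildMem (dm : List (String × List String)) (pkg c : String)
    (h : c ∈ pvKids dm pkg) : c ∈ dm.flatMap Prod.snd := by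
  induction dm with
  | nil => simp [pvKids, PySem.Dict.getD, PySem.Dict.get?] at h
  | cons p rest ih =>
    simp only [pvKids, PySem.Dict.getD] at h ih
    rw [PySem.Dict.get?_mk_cons] at h
    rw [List.flatMap_cons, List.mem_append]
    by_cases hk : p.1 == pkg
    · simp [hk] at h; exact Or.inl h
    · simp [hk] at h
      exact Or.inr (ih h)

-- each child produced by the enumerate loop lies in U (for U ⊇ all dependency values)
lemma pvEnumMem (dm : List (String × List String)) (U : List String)
    (HU : ∀ pkg c, c ∈ pvKids dm pkg → c ∈ U) (pkg : String) :
    ∀ p ∈ PySem.List.enumerate (pvKids dm pkg) 0, p.2 ∈ U := by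
  intro p hp
  rcases (PySem.List.mem_enumerate_iff _ _ _).1 hp with ⟨k, hk, rfl⟩
  exact HU pkg _ (List.getElem_mem hk)

-- visited only grows (A side)
lemma pvVisK_of (dm : List (String × List String)) (n : Nat)
    (hA : ∀ (pkg pre : String) (b : Bool) (st : PySem.Set String × List String) (x : String),
      x ∈ st.1 → x ∈ (pvDfsA dm n pkg pre b st).1) :
    ∀ (kids : List (Int × String)) (total : Int) (np : String)
      (st : PySem.Set String × List String) (x : String),
      x ∈ st.1 → x ∈ (pvKidsA dm n kids total np st).1 := by
  intro kids
  induction kids with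
  | nil => intro total np st x hx; simpa [pvKidsA] using hx
  | cons p rest ih =>
    intro total np st x hx
    obtain ⟨i, c⟩ := p
    simp only [pvKidsA]
    exact ih total np _ x (hA c np (i == total - 1) st x hx)

lemma pvVisA (dm : List (String × List String)) : ∀ (n : Nat) (pkg pre : String) (b : Bool)
    (st : PySem.Set String × List String) (x : String),
    x ∈ st.1 → x ∈ (pvDfsA dm n pkg pre b st).1 := by
  intro n
  induction n with
  | zero =>
    intro pkg pre b st x hx
    obtain ⟨v, ls⟩ := st
    simp only [pvDfsA, PySem.Set.contains_iff]
    by_cases hc : pkg ∈ v <;> simp [hc] <;> exact hx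
  | succ n ih =>
    intro pkg pre b st x hx
    obtain ⟨v, ls⟩ := st
    simp only [pvDfsA, PySem.Set.contains_iff]
    by_cases hc : pkg ∈ v
    · simp [hc]; exact hx
    · rw [if_neg hc]
      exact pvVisK_of dm n ih _ _ _ _ x ((PySem.Set.mem_add _ _ _).2 (Or.inl hx))

lemma pvMuA (dm : List (String × List String)) (U : List String) (n : Nat) (pkg pre : String)
    (b : Bool) (st : PySem.Set String × List String) :
    pvMu U (pvDfsA dm n pkg pre b st).1 ≤ pvMu U st.1 :=
  pvMu_mono U (fun x hx => pvVisA dm n pkg pre b st x hx)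

lemma pvMuK (dm : List (String × List String)) (U : List String) (n : Nat)
    (kids : List (Int × String)) (total : Int) (np : String)
    (st : PySem.Set String × List String) :
    pvMu U (pvKidsA dm n kids total np st).1 ≤ pvMu U st.1 :=
  pvMu_mono U (fun x hx => pvVisK_of dm n (pvVisA dm n) kids total np st x hx)

lemma pvMu_fst (U : List String) (v : PySem.Set String) (ls : List String) :
    pvMu U (Prod.fst (v, ls)) = pvMu U v := rfl

-- fuel irrelevance for B's stack loop
lemma pvFIB (dm : List (String × List String)) (U : List String)
    (HU : ∀ pkg c, c ∈ pvKids dm pkg → c ∈ U) :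
    ∀ (k : Nat) (fs : List (String × String × Bool)) (st : PySem.Set String × List String)
      (n m : Nat), pvMu U st.1 ≤ k → (∀ f ∈ fs, f.1 ∈ U) →
      pvMu U st.1 < n → pvMu U st.1 < m →
      pvRunB dm n fs st = pvRunB dm m fs st := by
  intro k
  induction k with
  | zero =>
    intro fs
    induction fs with
    | nil => intro st n m _ _ _ _; simp [pvRunB]
    | cons f fs ihf =>
      intro st n m hk hU hn hm
      obtain ⟨pkg, pre, b⟩ := f
      obtain ⟨v, ls⟩ := st
      simp only [pvMu_fst] at hk hn hm
      cases n with
      | zero => omega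
      | succ n' =>
        cases m with
        | zero => omega
        | succ m' =>
          simp only [pvRunB, PySem.Set.contains_iff]
          by_cases hc : pkg ∈ v
          · rw [if_pos hc, if_pos hc]
            apply ihf
            · exact hk
            · exact fun f hf => hU f (List.mem_cons_of_mem _ hf)
            · exact hn
            · exact hm
          · exfalso
            have := pvMu_add_lt U v (hU (pkg, pre, b) (List.mem_cons_self ..)) hc
            omega
  | succ k ihk =>
    intro fs
    induction fs with
    | nil => intro st n m _ _ _ _; simp [pvRunB]
    | cons f fs ihf =>
      intro st n m hk hU hn hm
      obtain ⟨pkg, pre, b⟩ := f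
      obtain ⟨v, ls⟩ := st
      simp only [pvMu_fst] at hk hn hm
      cases n with
      | zero => omega
      | succ n' =>
        cases m with
        | zero => omega
        | succ m' =>
          simp only [pvRunB, PySem.Set.contains_iff]
          by_cases hc : pkg ∈ v
          · rw [if_pos hc, if_pos hc]
            apply ihf
            · exact hk
            · exact fun f hf => hU f (List.mem_cons_of_mem _ hf)
            · exact hn
            · exact hm
          · rw [if_neg hc, if_neg hc]
            have hmem : pkg ∈ U := hU (pkg, pre, b) (List.mem_cons_self ..)
            have hlt := pvMu_add_lt U v hmem hc
            apply ihk
            · simp only [pvMu_fst]; omega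
            · intro f hf
              rcases List.mem_append.1 hf with hf | hf
              · rcases List.mem_map.1 hf with ⟨p, hp, rfl⟩
                exact pvEnumMem dm U HU pkg p hp
              · exact hU f (List.mem_cons_of_mem _ hf)
            · simp only [pvMu_fst]; omega
            · simp only [pvMu_fst]; omega

-- the simulation: one recursive dfs call equals processing the frame on B's stack
lemma pvSIMK (dm : List (String × List String)) (U : List String) (n : Nat)
    (hS : ∀ (pkg pre : String) (b : Bool) (fs : List (String × String × Bool))
      (st : PySem.Set String × List String) (nB : Nat),
      pkg ∈ U → (∀ f ∈ fs, f.1 ∈ U) → pvMu U st.1 < n → pvMu U st.1 < nB →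
      pvRunB dm nB ((pkg, pre, b) :: fs) st = pvRunB dm nB fs (pvDfsA dm n pkg pre b st)) :
    ∀ (kids : List (Int × String)) (total : Int) (np : String)
      (fs : List (String × String × Bool)) (st : PySem.Set String × List String) (nB : Nat),
      (∀ p ∈ kids, p.2 ∈ U) → (∀ f ∈ fs, f.1 ∈ U) → pvMu U st.1 < n → pvMu U st.1 < nB →
      pvRunB dm nB ((kids.map fun ic => (ic.2, np, ic.1 == total - 1)) ++ fs) st
        = pvRunB dm nB fs (pvKidsA dm n kids total np st) := by
  intro kids
  induction kids with
  | nil => intro total np fs st nB _ _ _ _; simp [pvKidsA]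
  | cons p rest ih =>
    intro total np fs st nB hkid hfs hn hB
    obtain ⟨i, c⟩ := p
    simp only [List.map_cons, List.cons_append, pvKidsA]
    rw [hS c np (i == total - 1) _ st nB (hkid (i, c) (List.mem_cons_self ..))
      (by
        intro f hf
        rcases List.mem_append.1 hf with hf | hf
        · rcases List.mem_map.1 hf with ⟨q, hq, rfl⟩
          exact hkid q (List.mem_cons_of_mem _ hq)
        · exact hfs f hf) hn hB]
    exact ih total np fs _ nB (fun q hq => hkid q (List.mem_cons_of_mem _ hq)) hfs
      (lt_of_le_of_lt (pvMuA dm U n c np (i == total - 1) st) hn)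
      (lt_of_le_of_lt (pvMuA dm U n c np (i == total - 1) st) hB)

lemma pvSIM (dm : List (String × List String)) (U : List String)
    (HU : ∀ pkg c, c ∈ pvKids dm pkg → c ∈ U) :
    ∀ (n : Nat) (pkg pre : String) (b : Bool) (fs : List (String × String × Bool))
      (st : PySem.Set String × List String) (nB : Nat),
      pkg ∈ U → (∀ f ∈ fs, f.1 ∈ U) → pvMu U st.1 < n → pvMu U st.1 < nB →
      pvRunB dm nB ((pkg, pre, b) :: fs) st = pvRunB dm nB fs (pvDfsA dm n pkg pre b st) := by
  intro n
  induction n using Nat.strong_induction_on with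
  | _ n ih =>
    intro pkg pre b fs st nB hpkg hfs hn hB
    obtain ⟨v, ls⟩ := st
    simp only [pvMu_fst] at hn hB
    cases n with
    | zero => omega
    | succ n' =>
      cases nB with
      | zero => omega
      | succ nB' =>
        simp only [pvRunB, pvDfsA, PySem.Set.contains_iff]
        by_cases hc : pkg ∈ v
        · simp [hc]
        · rw [if_neg hc, if_neg hc]
          have hlt := pvMu_add_lt U v hpkg hc
          rw [pvSIMK dm U n'
            (fun pkg2 pre2 b2 fs2 st2 nB2 h1 h2 h3 h4 =>
              ih n' (by omega) pkg2 pre2 b2 fs2 st2 nB2 h1 h2 h3 h4)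
            _ _ _ fs _ nB'
            (pvEnumMem dm U HU pkg)
            hfs (by simp only [pvMu_fst]; omega) (by simp only [pvMu_fst]; omega)]
          apply pvFIB dm U HU (pvMu U v)
          · exact le_of_lt (lt_of_le_of_lt (pvMuK dm U n' _ _ _ _) hlt)
          · exact hfs
          · exact lt_of_le_of_lt (pvMuK dm U n' _ _ _ _) (by simp only [pvMu_fst]; omega)
          · exact lt_of_le_of_lt (pvMuK dm U n' _ _ _ _) (by simp only [pvMu_fst]; omega)

-- ===== VERDICT (by name: the statement is the Claim_ definition above) =====
theorem build_ascii_tree_spec : Claim_equal_build_ascii_tree := by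
  intro root_pkg deps_map _
  unfold Spec_build_ascii_tree build_ascii_tree build_ascii_tree_alt
  have HU : ∀ pkg c, c ∈ pvKids deps_map pkg → c ∈ root_pkg :: deps_map.flatMap Prod.snd :=
    fun pkg c h => List.mem_cons_of_mem _ (pvChildMem deps_map pkg c h)
  have hmu : pvMu (root_pkg :: deps_map.flatMap Prod.snd) PySem.Set.empty
      < (deps_map.flatMap Prod.snd).length + 2 := by
    have := pvMu_le (root_pkg :: deps_map.flatMap Prod.snd) PySem.Set.empty
    simp only [List.length_cons] at this
    omega
  rw [pvSIM deps_map (root_pkg :: deps_map.flatMap Prod.snd) HU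
    ((deps_map.flatMap Prod.snd).length + 2) root_pkg "" true []
    (PySem.Set.empty, []) ((deps_map.flatMap Prod.snd).length + 2)
    (List.mem_cons_self ..) (by intro f hf; simp at hf) hmu hmu]
  simp [pvRunB]
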